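-- pv_equiv track=rewrite | github.com/MOHAMMAD-KIMIA/Compiler | Compiler 1st phase (Lexical Analysis)/COM.py | dfaLeftBrace
-- ===== SOURCE A (Python) =====
-- def dfaLeftBrace(input_text):
--     state = 'X'
--     left_brace_tokens = []
--     left_brace_errors = []
--     position = 0
--
--     for ch in input_text:
--         position += 1
--         if ch == '{':
--             left_brace_tokens.append("<{>")
--         else:
--             left_brace_errors.append(position)
--             break
--
--     return left_brace_tokens, left_brace_errors
-- ===== SOURCE B (Python) =====
-- def dfaLeftBrace(input_text):
--     count = len(input_text) - len(input_text.lstrip('{'))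
--     tokens = ["<{>"] * count
--     errors = [] if count == len(input_text) else [count + 1]
--     return tokens, errors
-- ===== Notes on version B (the rewrite author's own statement) =====
-- stated objective: simpler
-- what changed: Replaces the per-character loop with break and a position counter by a boundary computation (lstrip-based count of leading braces) followed by direct construction of the token list and the error list.
import Mathlib
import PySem

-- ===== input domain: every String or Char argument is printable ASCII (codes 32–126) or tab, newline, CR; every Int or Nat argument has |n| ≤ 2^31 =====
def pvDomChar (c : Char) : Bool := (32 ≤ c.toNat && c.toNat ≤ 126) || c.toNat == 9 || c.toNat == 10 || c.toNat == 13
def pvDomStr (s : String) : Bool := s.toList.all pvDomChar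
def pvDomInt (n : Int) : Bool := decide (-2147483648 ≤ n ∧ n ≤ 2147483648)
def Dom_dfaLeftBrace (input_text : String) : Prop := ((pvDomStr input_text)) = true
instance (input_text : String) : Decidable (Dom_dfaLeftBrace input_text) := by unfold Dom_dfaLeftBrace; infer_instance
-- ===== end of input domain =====

-- B replaces A's per-character loop-with-break by a leading-brace count and direct list construction (simpler decomposition, same cost).

-- ===== PORT A =====
-- A's for-loop with break, as structural recursion over the characters carrying the 1-based position.
def dfaLeftBraceGo (cs : List Char) (position : Int) : List String × List Int :=
  match cs with
  | [] => ([], [])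
  | ch :: rest =>
    if ch == '{' then
      let r := dfaLeftBraceGo rest (position + 1)
      ("<{>" :: r.1, r.2)
    else
      ([], [position + 1])

def dfaLeftBrace (input_text : String) : List String × List Int :=
  dfaLeftBraceGo input_text.toList 0

-- ===== PORT B =====
-- lstrip('{') ported as dropWhile (· == '{') on the char list (exact: lstrip with a one-char set drops exactly the leading '{'s).
def dfaLeftBrace_alt (input_text : String) : List String × List Int :=
  let cs := input_text.toList
  let count : Nat := cs.length - (cs.dropWhile (fun c => c == '{')).length
  let tokens := List.replicate count "<{>"
  let errors : List Int := if count = cs.length then [] else [(count : Int) + 1]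
  (tokens, errors)

-- ===== PRECONDITION & SPEC =====
def Spec_dfaLeftBrace (input_text : String) (out : List String × List Int) : Prop := out = dfaLeftBrace_alt input_text
instance (input_text : String) (out : List String × List Int) : Decidable (Spec_dfaLeftBrace input_text out) := by unfold Spec_dfaLeftBrace; infer_instance

-- ===== CLAIM (what is proved, stated in full; the proofs are below) =====
def Claim_equal_dfaLeftBrace : Prop := ∀ (input_text : String), Dom_dfaLeftBrace input_text → Spec_dfaLeftBrace input_text (dfaLeftBrace input_text)

-- ===== LEMMAS AND PROOFS =====

theorem dfaLeftBraceGo_eq (cs : List Char) (pos : Int) :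
    dfaLeftBraceGo cs pos =
      (List.replicate (cs.takeWhile (fun c => c == '{')).length "<{>",
       if (cs.takeWhile (fun c => c == '{')).length = cs.length then []
       else [pos + (cs.takeWhile (fun c => c == '{')).length + 1]) := by
  induction cs generalizing pos with
  | nil => simp [dfaLeftBraceGo]
  | cons c rest ih =>
    by_cases hc : c == '{'
    · simp only [dfaLeftBraceGo, hc, if_true, List.takeWhile_cons, ih (pos + 1),
        List.length_cons, List.replicate_succ]
      by_cases h : (rest.takeWhile (fun c => c == '{')).length = rest.length
      · simp [h]
      · simp [h]
        ring
    · simp [dfaLeftBraceGo, hc]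

theorem takeWhile_length_eq (cs : List Char) :
    cs.length - (cs.dropWhile (fun c => c == '{')).length = (cs.takeWhile (fun c => c == '{')).length := by
  have h := List.takeWhile_append_dropWhile (p := fun c => c == '{') (l := cs)
  have hl : (cs.takeWhile (fun c => c == '{')).length + (cs.dropWhile (fun c => c == '{')).length = cs.length := by
    calc (cs.takeWhile (fun c => c == '{')).length + (cs.dropWhile (fun c => c == '{')).length
        = (cs.takeWhile (fun c => c == '{') ++ cs.dropWhile (fun c => c == '{')).length := (List.length_append).symm
      _ = cs.length := by rw [h]
  omega

-- ===== VERDICT (by name: the statement is the Claim_ definition above) =====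
theorem dfaLeftBrace_spec : Claim_equal_dfaLeftBrace := by
  intro s _
  unfold Spec_dfaLeftBrace dfaLeftBrace dfaLeftBrace_alt
  rw [dfaLeftBraceGo_eq]
  simp only []
  rw [takeWhile_length_eq]
  simp
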